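-- pv_equiv track=rewrite | github.com/kylepaps/Maze-Pathfinder | solve.py | lowest_dist_to_goal
-- ===== SOURCE A (Python) =====
-- def lowest_dist_to_goal(moves, goal):
--     #check the lowest distance to the goal on an X, Y axis from a list of possible moves
--
--     #create new list: distances. Append the distances of each move to the list
--     distances = []
--     for i in moves:
--         row_diff = abs(goal[0] - i[0])
--         col_diff = abs(goal[1] - i[1])
--         dist = row_diff + col_diff
--         distances.append(dist)
--
--     #from the list of distances, find the shortest distance
--     shortest = distances[0]
--     for i in distances:
--         if i < shortest:
--             shortest = i
--
--     #find the index of the shortest distance in the list of moves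
--     index = distances.index(shortest)
--     lowest_dist_move = moves[index]
--
--     #return the move with the shortest distance
--     return lowest_dist_move
-- ===== SOURCE B (Python) =====
-- def lowest_dist_to_goal(moves, goal):
--     # single-pass argmin: track the best move and its distance as we scan
--     best_move = moves[0]
--     best_dist = abs(goal[0] - best_move[0]) + abs(goal[1] - best_move[1])
--     for move in moves[1:]:
--         dist = abs(goal[0] - move[0]) + abs(goal[1] - move[1])
--         if dist < best_dist:
--             best_move, best_dist = move, dist
--     return best_move
-- ===== Notes on version B (the rewrite author's own statement) =====
-- stated objective: simpler
-- what changed: Replaced A's three passes (build a distances list, scan it for the minimum, then distances.index + moves[index]) by a single pass that tracks the best move and its distance, with strict < preserving first-occurrence tie-breaking.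
import Mathlib
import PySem

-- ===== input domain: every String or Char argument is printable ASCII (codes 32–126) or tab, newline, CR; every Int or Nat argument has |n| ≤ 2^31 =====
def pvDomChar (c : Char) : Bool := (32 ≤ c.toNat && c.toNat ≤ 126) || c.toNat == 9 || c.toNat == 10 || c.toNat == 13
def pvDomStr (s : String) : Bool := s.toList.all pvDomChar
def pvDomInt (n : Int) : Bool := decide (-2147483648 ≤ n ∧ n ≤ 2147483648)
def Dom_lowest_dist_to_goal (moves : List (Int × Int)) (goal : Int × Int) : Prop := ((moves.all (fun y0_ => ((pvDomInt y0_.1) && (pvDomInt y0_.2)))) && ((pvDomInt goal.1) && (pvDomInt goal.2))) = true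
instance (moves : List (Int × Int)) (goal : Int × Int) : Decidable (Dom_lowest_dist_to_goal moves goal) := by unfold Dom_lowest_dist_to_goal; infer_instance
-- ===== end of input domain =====

-- B replaces A's three passes (distances list, min scan, index re-scan) by one
-- argmin pass tracking (best move, best distance); objective: simpler.


-- ===== PORT A =====
def lowest_dist_to_goal (moves : List (Int × Int)) (goal : Int × Int) : Int × Int :=
  -- distances = []; for i in moves: distances.append(|g0-i0| + |g1-i1|)
  let distances := moves.foldl (fun acc i => acc ++ [|goal.1 - i.1| + |goal.2 - i.2|]) []
  -- shortest = distances[0]  (IndexError on empty moves: excluded by Pre_)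
  match PySem.List.pyGet? distances 0 with
  | none => (0, 0)
  | some d0 =>
    -- for i in distances: if i < shortest: shortest = i
    let shortest := distances.foldl (fun s i => if i < s then i else s) d0
    -- index = distances.index(shortest); return moves[index]
    match PySem.List.index? distances shortest with
    | none => (0, 0)
    | some idx =>
      match PySem.List.pyGet? moves (idx : Int) with
      | none => (0, 0)
      | some m => m

-- ===== PORT B =====
def lowest_dist_to_goal_alt (moves : List (Int × Int)) (goal : Int × Int) : Int × Int :=
  -- best_move = moves[0]  (IndexError on empty moves: excluded by Pre_)
  match PySem.List.pyGet? moves 0 with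
  | none => (0, 0)
  | some m0 =>
    -- for move in moves[1:]: keep (best_move, best_dist) with strict <
    ((PySem.List.slice moves (some 1) none).foldl
      (fun st move =>
        let d := |goal.1 - move.1| + |goal.2 - move.2|
        if d < st.2 then (move, d) else st)
      (m0, |goal.1 - m0.1| + |goal.2 - m0.2|)).1

-- ===== PRECONDITION & SPEC =====
-- Pre_ excludes only the empty move list, on which both A and B raise IndexError.
def Pre_lowest_dist_to_goal (moves : List (Int × Int)) (goal : Int × Int) : Prop := moves ≠ []
instance (moves : List (Int × Int)) (goal : Int × Int) : Decidable (Pre_lowest_dist_to_goal moves goal) := by unfold Pre_lowest_dist_to_goal; infer_instance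
def pvWitness_lowest_dist_to_goal : (List (Int × Int)) × (Int × Int) := ([(1, 2), (0, 0)], (3, 4))

def Spec_lowest_dist_to_goal (moves : List (Int × Int)) (goal : Int × Int) (out : Int × Int) : Prop := out = lowest_dist_to_goal_alt moves goal
instance (moves : List (Int × Int)) (goal : Int × Int) (out : Int × Int) : Decidable (Spec_lowest_dist_to_goal moves goal out) := by unfold Spec_lowest_dist_to_goal; infer_instance

-- ===== CLAIM (what is proved, stated in full; the proofs are below) =====
def Claim_equal_lowest_dist_to_goal : Prop := ∀ (moves : List (Int × Int)) (goal : Int × Int), Dom_lowest_dist_to_goal moves goal → Pre_lowest_dist_to_goal moves goal → Spec_lowest_dist_to_goal moves goal (lowest_dist_to_goal moves goal)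

-- ===== LEMMAS AND PROOFS =====

-- Manhattan distance of a move to the goal
def pvDist (g i : Int × Int) : Int := |g.1 - i.1| + |g.2 - i.2|

-- reference argmin (first element achieving the minimum of pvDist g over b :: xs)
def pvAm (g : Int × Int) (b : Int × Int) : List (Int × Int) → Int × Int
  | [] => b
  | x :: xs => if pvDist g x < pvDist g b then pvAm g x xs else pvAm g b xs

theorem pvAm_le (g b : Int × Int) (xs : List (Int × Int)) :
    pvDist g (pvAm g b xs) ≤ pvDist g b := by
  induction xs generalizing b with
  | nil => simp [pvAm]
  | cons x xs ih =>
    simp only [pvAm]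
    split_ifs with h
    · exact le_trans (ih x) (le_of_lt h)
    · exact ih b

theorem pvAm_eq_of_dist_eq (g b : Int × Int) (xs : List (Int × Int))
    (h : pvDist g (pvAm g b xs) = pvDist g b) : pvAm g b xs = b := by
  induction xs generalizing b with
  | nil => simp [pvAm]
  | cons x xs ih =>
    simp only [pvAm] at h ⊢
    split_ifs at h ⊢ with hx
    · exfalso
      have h1 := pvAm_le g x xs
      omega
    · exact ih b h

theorem pvAm_mem (g b : Int × Int) (xs : List (Int × Int)) :
    pvAm g b xs ∈ b :: xs := by
  induction xs generalizing b with
  | nil => simp [pvAm]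
  | cons x xs ih =>
    simp only [pvAm]
    split_ifs with h
    · have := ih x
      simp only [List.mem_cons] at this ⊢
      tauto
    · have := ih b
      simp only [List.mem_cons] at this ⊢
      tauto

-- A's appending loop builds the map
theorem pvFoldAppend (g : Int × Int) (l : List (Int × Int)) (acc : List Int) :
    l.foldl (fun acc i => acc ++ [|g.1 - i.1| + |g.2 - i.2|]) acc
      = acc ++ l.map (pvDist g) := by
  induction l generalizing acc with
  | nil => simp
  | cons x xs ih => simp [ih, pvDist]

-- A's min loop computes pvDist of the argmin
theorem pvFoldMin (g b : Int × Int) (xs : List (Int × Int)) :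
    (xs.map (pvDist g)).foldl (fun s i => if i < s then i else s) (pvDist g b)
      = pvDist g (pvAm g b xs) := by
  induction xs generalizing b with
  | nil => simp [pvAm]
  | cons x xs ih =>
    simp only [List.map_cons, List.foldl_cons, pvAm]
    split_ifs with h
    · exact ih x
    · exact ih b

-- B's loop computes the argmin together with its distance
theorem pvFoldArgmin (g b : Int × Int) (xs : List (Int × Int)) :
    xs.foldl (fun st move =>
        if |g.1 - move.1| + |g.2 - move.2| < st.2
        then (move, |g.1 - move.1| + |g.2 - move.2|) else st) (b, pvDist g b)
      = (pvAm g b xs, pvDist g (pvAm g b xs)) := by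
  induction xs generalizing b with
  | nil => simp [pvAm]
  | cons x xs ih =>
    simp only [List.foldl_cons, pvAm]
    by_cases h : pvDist g x < pvDist g b
    · rw [if_pos (show |g.1 - x.1| + |g.2 - x.2| < (b, pvDist g b).2 from h), if_pos h]
      exact ih x
    · rw [if_neg (show ¬(|g.1 - x.1| + |g.2 - x.2| < (b, pvDist g b).2) from h), if_neg h]
      exact ih b

-- the argmin is the FIRST element of b :: xs whose distance equals the minimum
theorem pvFindAm (g b : Int × Int) (xs : List (Int × Int)) :
    List.find? (fun i => pvDist g i == pvDist g (pvAm g b xs)) (b :: xs)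
      = some (pvAm g b xs) := by
  induction xs generalizing b with
  | nil => simp [pvAm]
  | cons x xs ih =>
    simp only [pvAm]
    split_ifs with h
    · have hne : pvDist g b ≠ pvDist g (pvAm g x xs) := by
        have := pvAm_le g x xs
        omega
      rw [List.find?_cons_of_neg (by simpa using hne)]
      exact ih x
    · by_cases hb : pvDist g b = pvDist g (pvAm g b xs)
      · have hab : pvAm g b xs = b := pvAm_eq_of_dist_eq g b xs hb.symm
        rw [hab] at hb ⊢
        rw [List.find?_cons_of_pos (by simp)]
      · rw [List.find?_cons_of_neg (by simpa using hb)]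
        have hlt : pvDist g (pvAm g b xs) < pvDist g b :=
          lt_of_le_of_ne (pvAm_le g b xs) (fun e => hb e.symm)
        have hxle : pvDist g b ≤ pvDist g x := not_lt.mp h
        have hxne : pvDist g x ≠ pvDist g (pvAm g b xs) := by omega
        rw [List.find?_cons_of_neg (by simp [hxne])]
        have := ih b
        rw [List.find?_cons_of_neg (by simpa using hb)] at this
        exact this

-- bridge: distances.index + moves[index] is find? over moves
theorem pvIndexGet (g : Int × Int) (l : List (Int × Int)) (s : Int) (idx : Nat)
    (h : PySem.List.index? (l.map (pvDist g)) s = some idx) :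
    PySem.List.pyGet? l (idx : Int) = List.find? (fun i => pvDist g i == s) l := by
  induction l generalizing idx with
  | nil => simp [PySem.List.index?] at h
  | cons a t ih =>
    by_cases ha : pvDist g a = s
    · rw [List.map_cons, ha, PySem.List.index?_cons_self] at h
      cases h
      simp [List.find?_cons_of_pos, ha]
    · rw [List.map_cons, PySem.List.index?_cons_of_ne (List.map (pvDist g) t) ha] at h
      cases hj : PySem.List.index? (t.map (pvDist g)) s with
      | none => rw [hj] at h; simp at h
      | some j =>
        rw [hj] at h
        simp only [Option.map_some] at h
        cases h
        rw [List.find?_cons_of_neg (by simp [ha])]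
        rw [show ((j + 1 : Nat) : Int) = ((j : Nat) : Int) + 1 by push_cast; ring,
            PySem.List.pyGet?_cons_succ]
        exact ih j hj

-- ===== VERDICT (by name: the statement is the Claim_ definition above) =====
theorem lowest_dist_to_goal_spec : Claim_equal_lowest_dist_to_goal := by
  intro moves goal _ hpre
  cases moves with
  | nil => exact absurd rfl hpre
  | cons b xs =>
    unfold Spec_lowest_dist_to_goal lowest_dist_to_goal lowest_dist_to_goal_alt
    rw [pvFoldAppend goal (b :: xs) []]
    simp only [List.nil_append, List.map_cons]
    rw [PySem.List.pyGet?_zero_cons, PySem.List.pyGet?_zero_cons]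
    simp only [List.foldl_cons]
    have hfirst : (if pvDist goal b < pvDist goal b then pvDist goal b else pvDist goal b)
        = pvDist goal b := by simp
    rw [hfirst, pvFoldMin goal b xs]
    have hmem : pvDist goal (pvAm goal b xs) ∈ (b :: xs).map (pvDist goal) :=
      List.mem_map_of_mem (pvAm_mem goal b xs)
    have hsome : ∃ idx, PySem.List.index? ((b :: xs).map (pvDist goal))
        (pvDist goal (pvAm goal b xs)) = some idx := by
      have := (PySem.List.index?_isSome_iff ((b :: xs).map (pvDist goal))
        (pvDist goal (pvAm goal b xs))).mpr hmem
      exact Option.isSome_iff_exists.mp this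
    obtain ⟨idx, hidx⟩ := hsome
    simp only [List.map_cons] at hidx
    rw [hidx]
    have hget := pvIndexGet goal (b :: xs) (pvDist goal (pvAm goal b xs)) idx
      (by simpa using hidx)
    have hpy : PySem.List.pyGet? (b :: xs) (idx : Int) = some (pvAm goal b xs) := by
      rw [hget, pvFindAm goal b xs]
    simp only [hpy]
    rw [PySem.List.slice_from_one, List.tail_cons]
    have hbd : |goal.1 - b.1| + |goal.2 - b.2| = pvDist goal b := rfl
    rw [hbd, pvFoldArgmin goal b xs]
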